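-- pv_equiv track=rewrite | github.com/Craybloge/Campus-Academy | ProgrammePython/Main.py | adding_star
-- ===== SOURCE A (Python) =====
-- def adding_star(drawing, MAX_WIDTH):
--     spaces = MAX_WIDTH-5
--     star_spaces = 4
--     for line in range(7):
--         drawing.append([])
--         for rows in range(spaces):
--             drawing[line].append(" ")
--         if line < 2:
--             for rows in range(4-star_spaces):
--                 drawing[line].append(" ")
--             drawing[line].append("*")
--             for rows in range(2):
--                 for rows in range(star_spaces):
--                     drawing[line].append(" ")
--                 drawing[line].append("*")
--             for rows in range(4-star_spaces):
--                 drawing[line].append(" ")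
--             star_spaces -= 2
--         if line == 3:
--             for rows in range(11):
--                 if rows%2 == 0:
--                     drawing[line].append("*")
--                 else:
--                     drawing[line].append(" ")
--         if line in (4,2):
--             for rows in range(5):
--                 drawing[line].append(" ")
--             drawing[line].append("*")
--             for rows in range(5):
--                 drawing[line].append(" ")
--         if line == 5:
--             for rows in range(2):
--                 drawing[line].append(" ")
--             drawing[line].append("*")
--             for rows in range(2):
--                 drawing[line].append(" ")
--             drawing[line].append("|")
--             for rows in range(2):
--                 drawing[line].append(" ")
--             drawing[line].append("*")
--             for rows in range(2):
--                 drawing[line].append(" ")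
--         if line == 6:
--             drawing[line].append("*")
--             for rows in range(4):
--                 drawing[line].append(" ")
--             drawing[line].append("|")
--             for rows in range(4):
--                 drawing[line].append(" ")
--             drawing[line].append("*")
--         for rows in range(spaces):
--             drawing[line].append(" ")
--     return drawing
-- ===== SOURCE B (Python) =====
-- _PATTERNS = [
--     "*    *    *",
--     "  *  *  *  ",
--     "     *     ",
--     "* * * * * *",
--     "     *     ",
--     "  *  |  *  ",
--     "*    |    *",
-- ]
--
-- def adding_star(drawing, MAX_WIDTH):
--     pad = [" "] * (MAX_WIDTH - 5)
--     for line in range(7):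
--         drawing.append([])
--         drawing[line].extend(pad + list(_PATTERNS[line]) + pad)
--     return drawing
-- ===== Notes on version B (the rewrite author's own statement) =====
-- stated objective: simpler
-- what changed: Replaces A's star_spaces counter and the five per-line if-branches full of append loops by a fixed table of the seven 11-character line patterns, written in one uniform pad + pattern + pad pass.
import Mathlib
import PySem

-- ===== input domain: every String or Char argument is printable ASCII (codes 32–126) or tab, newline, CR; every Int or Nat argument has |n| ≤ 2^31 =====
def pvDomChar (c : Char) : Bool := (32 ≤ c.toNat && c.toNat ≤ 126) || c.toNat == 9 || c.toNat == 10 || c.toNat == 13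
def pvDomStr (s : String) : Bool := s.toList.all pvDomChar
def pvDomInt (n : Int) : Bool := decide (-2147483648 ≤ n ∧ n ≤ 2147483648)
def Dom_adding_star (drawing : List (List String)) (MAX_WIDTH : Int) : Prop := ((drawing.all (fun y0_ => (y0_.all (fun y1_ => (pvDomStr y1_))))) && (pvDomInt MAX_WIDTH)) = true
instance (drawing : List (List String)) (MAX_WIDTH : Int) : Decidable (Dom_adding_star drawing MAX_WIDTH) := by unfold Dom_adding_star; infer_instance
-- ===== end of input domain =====

-- B replaces A's star_spaces counter and per-line if-branches by a fixed table of the 7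
-- 11-char line patterns, one uniform pad++pattern++pad pass (simpler); A mutates `drawing`
-- in place and B performs the same mutation; the theorem is about the return value.

-- ===== PORT A =====
-- all appends A makes to drawing[line] in one iteration, in A's order (branches in A's order)
def pvAContent (line : Nat) (star_spaces : Int) (spaces : Nat) (r : List String) : List String :=
  let r := r ++ List.replicate spaces " "
  let r := if line < 2 then
      r ++ List.replicate (4 - star_spaces).toNat " " ++ ["*"]
        ++ (List.range 2).foldl
            (fun acc _ => acc ++ List.replicate star_spaces.toNat " " ++ ["*"]) []
        ++ List.replicate (4 - star_spaces).toNat " "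
    else r
  let r := if line == 3 then
      r ++ (List.range 11).foldl
            (fun acc rows => acc ++ [if rows % 2 == 0 then "*" else " "]) []
    else r
  let r := if line == 4 || line == 2 then
      r ++ List.replicate 5 " " ++ ["*"] ++ List.replicate 5 " "
    else r
  let r := if line == 5 then
      r ++ List.replicate 2 " " ++ ["*"] ++ List.replicate 2 " " ++ ["|"]
        ++ List.replicate 2 " " ++ ["*"] ++ List.replicate 2 " "
    else r
  let r := if line == 6 then
      r ++ ["*"] ++ List.replicate 4 " " ++ ["|"] ++ List.replicate 4 " " ++ ["*"]
    else r
  r ++ List.replicate spaces " "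

def adding_star (drawing : List (List String)) (MAX_WIDTH : Int) : List (List String) :=
  let spaces := (MAX_WIDTH - 5).toNat   -- range(spaces) is empty for negative spaces
  ((List.range 7).foldl (fun (st : List (List String) × Int) line =>
      ((st.1 ++ [[]]).modify line (pvAContent line st.2 spaces),
       if line < 2 then st.2 - 2 else st.2))
    (drawing, 4)).1

-- ===== PORT B =====
-- the 7 line patterns, as lists of 1-char strings (list(pattern) in Source B)
def pvPatterns : List (List String) :=
  [["*", " ", " ", " ", " ", "*", " ", " ", " ", " ", "*"],
   [" ", " ", "*", " ", " ", "*", " ", " ", "*", " ", " "],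
   [" ", " ", " ", " ", " ", "*", " ", " ", " ", " ", " "],
   ["*", " ", "*", " ", "*", " ", "*", " ", "*", " ", "*"],
   [" ", " ", " ", " ", " ", "*", " ", " ", " ", " ", " "],
   [" ", " ", "*", " ", " ", "|", " ", " ", "*", " ", " "],
   ["*", " ", " ", " ", " ", "|", " ", " ", " ", " ", "*"]]

def adding_star_alt (drawing : List (List String)) (MAX_WIDTH : Int) : List (List String) :=
  let pad := List.replicate (MAX_WIDTH - 5).toNat " "
  (List.range 7).foldl
    (fun d line =>
      (d ++ [[]]).modify line (fun r => r ++ (pad ++ pvPatterns.getD line [] ++ pad)))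
    drawing

-- ===== PRECONDITION & SPEC =====
def Spec_adding_star (drawing : List (List String)) (MAX_WIDTH : Int) (out : List (List String)) : Prop := out = adding_star_alt drawing MAX_WIDTH
instance (drawing : List (List String)) (MAX_WIDTH : Int) (out : List (List String)) : Decidable (Spec_adding_star drawing MAX_WIDTH out) := by unfold Spec_adding_star; infer_instance

-- ===== CLAIM (what is proved, stated in full; the proofs are below) =====
def Claim_equal_adding_star : Prop := ∀ (drawing : List (List String)) (MAX_WIDTH : Int), Dom_adding_star drawing MAX_WIDTH → Spec_adding_star drawing MAX_WIDTH (adding_star drawing MAX_WIDTH)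

-- ===== LEMMAS AND PROOFS =====
theorem pvAContent_eq_0 (n : Nat) :
    pvAContent 0 4 n = fun r => r ++ (List.replicate n " " ++ pvPatterns.getD 0 [] ++ List.replicate n " ") := by
  funext r
  simp [pvAContent, pvPatterns, List.range_succ, List.append_assoc]

theorem pvAContent_eq_1 (n : Nat) :
    pvAContent 1 2 n = fun r => r ++ (List.replicate n " " ++ pvPatterns.getD 1 [] ++ List.replicate n " ") := by
  funext r
  simp [pvAContent, pvPatterns, List.range_succ, List.append_assoc]

theorem pvAContent_eq_2 (n : Nat) :
    pvAContent 2 0 n = fun r => r ++ (List.replicate n " " ++ pvPatterns.getD 2 [] ++ List.replicate n " ") := by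
  funext r
  simp [pvAContent, pvPatterns, List.append_assoc]

theorem pvAContent_eq_3 (n : Nat) :
    pvAContent 3 0 n = fun r => r ++ (List.replicate n " " ++ pvPatterns.getD 3 [] ++ List.replicate n " ") := by
  funext r
  simp [pvAContent, pvPatterns, List.range_succ, List.append_assoc]

theorem pvAContent_eq_4 (n : Nat) :
    pvAContent 4 0 n = fun r => r ++ (List.replicate n " " ++ pvPatterns.getD 4 [] ++ List.replicate n " ") := by
  funext r
  simp [pvAContent, pvPatterns, List.append_assoc]

theorem pvAContent_eq_5 (n : Nat) :
    pvAContent 5 0 n = fun r => r ++ (List.replicate n " " ++ pvPatterns.getD 5 [] ++ List.replicate n " ") := by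
  funext r
  simp [pvAContent, pvPatterns, List.append_assoc]

theorem pvAContent_eq_6 (n : Nat) :
    pvAContent 6 0 n = fun r => r ++ (List.replicate n " " ++ pvPatterns.getD 6 [] ++ List.replicate n " ") := by
  funext r
  simp [pvAContent, pvPatterns, List.append_assoc]


-- ===== VERDICT (by name: the statement is the Claim_ definition above) =====
theorem adding_star_spec : Claim_equal_adding_star := by
  intro d M _
  show adding_star d M = adding_star_alt d M
  simp [adding_star, adding_star_alt, pvPatterns, List.range_succ, List.append_assoc,
        pvAContent_eq_0, pvAContent_eq_1, pvAContent_eq_2, pvAContent_eq_3,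
        pvAContent_eq_4, pvAContent_eq_5, pvAContent_eq_6]
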